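-- pv_equiv track=rewrite | github.com/kupuguy/aoc2023 | src/day7.py | joker_hands
-- ===== SOURCE A (Python) =====
-- from typing import Sequence
--
-- STRENGTHS = "J23456789TQKA"
--
-- def joker_hands(raw_cards: str) -> Sequence[str]:
--     other_cards = set(raw_cards) - {"J"}
--
--     if "J" not in raw_cards or other_cards == set():
--         yield raw_cards
--         return
--
--     for card in STRENGTHS[1:]:
--         cards = raw_cards.replace("J", card, 1)
--         yield from joker_hands(cards)
-- ===== SOURCE B (Python) =====
-- STRENGTHS = "J23456789TQKA"
--
-- def joker_hands(raw_cards: str):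
--     # All-joker (or empty) hands are yielded unchanged, like A's base case.
--     if all(c == 'J' for c in raw_cards):
--         yield raw_cards
--         return
--     subs = STRENGTHS[1:]
--     base = len(subs)
--     k = raw_cards.count('J')
--     # Enumerate substitutions arithmetically: n is a k-digit base-12 number,
--     # most significant digit goes to the leftmost 'J'.
--     for n in range(base ** k):
--         digits = []
--         m = n
--         for _ in range(k):
--             digits.append(subs[m % base])
--             m //= base
--         digits = digits[::-1]
--         out = []
--         for c in raw_cards:
--             out.append(digits.pop(0) if c == 'J' else c)
--         yield ''.join(out)
-- ===== Notes on version B (the rewrite author's own statement) =====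
-- stated objective: alternative
-- what changed: A recursively replaces the first joker and recurses once per replacement card; B enumerates all substitutions in one flat loop by decoding a base-12 counter into the joker positions (most significant digit to the leftmost joker), keeping the all-joker/empty hand as the single unchanged yield.
import Mathlib
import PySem

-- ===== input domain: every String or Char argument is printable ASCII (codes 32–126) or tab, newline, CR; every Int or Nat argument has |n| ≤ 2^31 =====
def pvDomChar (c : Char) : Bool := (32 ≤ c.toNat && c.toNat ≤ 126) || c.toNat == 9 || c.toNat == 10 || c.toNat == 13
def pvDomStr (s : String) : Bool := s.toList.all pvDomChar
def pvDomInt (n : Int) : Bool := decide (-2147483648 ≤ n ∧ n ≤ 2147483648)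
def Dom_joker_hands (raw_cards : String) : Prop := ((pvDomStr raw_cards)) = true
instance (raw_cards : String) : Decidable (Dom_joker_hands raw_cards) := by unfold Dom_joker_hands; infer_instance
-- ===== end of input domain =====

-- B replaces A's branching recursion by a single arithmetic enumeration (base-12 counter
-- over the joker positions); objective: alternative decomposition, same asymptotic cost.

-- ===== PORT A =====
-- STRENGTHS[1:]
def pvStrengthsTail : List Char := "23456789TQKA".toList

-- raw_cards.replace("J", card, 1): hand-ported (PySem.Str.replace has no count argument);
-- exact for a single-character pattern: replaces the first 'J' if any.
def pvReplaceFirstJ (cs : List Char) (card : Char) : List Char :=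
  match cs with
  | [] => []
  | c :: rest => if c == 'J' then card :: rest else c :: pvReplaceFirstJ rest card

-- the recursive generator, on List Char; fuel only makes the recursion structural
-- (each recursive call removes one 'J', so count 'J' + 1 fuel is always enough)
def pvJokerA (fuel : Nat) (cs : List Char) : List (List Char) :=
  match fuel with
  | 0 => []
  | fuel + 1 =>
    let other : PySem.Set Char := PySem.Set.diff (PySem.Set.ofList cs) ['J']
    if !cs.contains 'J' || other.isEmpty then [cs]
    else pvStrengthsTail.flatMap (fun card => pvJokerA fuel (pvReplaceFirstJ cs card))

def joker_hands (raw_cards : String) : List String :=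
  (pvJokerA (raw_cards.toList.count 'J' + 1) raw_cards.toList).map String.ofList

-- ===== PORT B =====
-- digits of n in base `base`, least significant first, as cards from subs
def pvJhDigits (base : Nat) (subs : List Char) : Nat → Nat → List Char
  | 0, _ => []
  | k + 1, m => subs.getD (m % base) ' ' :: pvJhDigits base subs k (m / base)

-- replace each 'J' in cs by the next digit (digits.pop(0)); headD/tail guard only
-- (B always supplies exactly count 'J' digits)
def pvJhSub : List Char → List Char → List Char
  | [], _ => []
  | c :: t, ds => if c == 'J' then ds.headD ' ' :: pvJhSub t ds.tail else c :: pvJhSub t ds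

def joker_hands_alt (raw_cards : String) : List String :=
  let cs := raw_cards.toList
  if cs.all (fun c => c == 'J') then [raw_cards]
  else
    let subs := "23456789TQKA".toList
    let base := subs.length
    let k := cs.count 'J'
    (List.range (base ^ k)).map (fun n =>
      String.ofList (pvJhSub cs ((pvJhDigits base subs k n).reverse)))

-- ===== PRECONDITION & SPEC =====
def Spec_joker_hands (raw_cards : String) (out : List String) : Prop := out = joker_hands_alt raw_cards
instance (raw_cards : String) (out : List String) : Decidable (Spec_joker_hands raw_cards out) := by unfold Spec_joker_hands; infer_instance

-- ===== CLAIM (what is proved, stated in full; the proofs are below) =====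
def Claim_equal_joker_hands : Prop := ∀ (raw_cards : String), Dom_joker_hands raw_cards → Spec_joker_hands raw_cards (joker_hands raw_cards)

-- ===== LEMMAS AND PROOFS =====

theorem pvSubs_ne_J : ∀ c ∈ pvStrengthsTail, c ≠ 'J' := by
  have h : pvStrengthsTail.all (fun c => c != 'J') = true := by rfl
  intro c hc
  simpa using List.all_eq_true.mp h c hc

theorem pvReplaceFirstJ_eq (pre suf : List Char) (card : Char) (h : 'J' ∉ pre) :
    pvReplaceFirstJ (pre ++ 'J' :: suf) card = pre ++ card :: suf := by
  induction pre with
  | nil => simp [pvReplaceFirstJ]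
  | cons c t ih =>
    simp only [List.mem_cons, not_or] at h
    simp [pvReplaceFirstJ, beq_iff_eq, Ne.symm h.1, ih h.2]

theorem pvJhSub_prefix (pre r ds : List Char) (h : 'J' ∉ pre) :
    pvJhSub (pre ++ r) ds = pre ++ pvJhSub r ds := by
  induction pre with
  | nil => rfl
  | cons c t ih =>
    simp only [List.mem_cons, not_or] at h
    simp [pvJhSub, beq_iff_eq, Ne.symm h.1, ih h.2]

theorem pvJhDigits_reverse_succ (b : Nat) (s : List Char) (k M : Nat) :
    (pvJhDigits b s (k + 1) M).reverse
      = s.getD (M / b ^ k % b) ' ' :: (pvJhDigits b s k M).reverse := by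
  induction k generalizing M with
  | zero => simp [pvJhDigits]
  | succ k ih =>
    have : (pvJhDigits b s (k + 2) M).reverse
        = (pvJhDigits b s (k + 1) (M / b)).reverse ++ [s.getD (M % b) ' '] := by
      simp [pvJhDigits]
    rw [this, ih]
    have hd : M / b / b ^ k = M / b ^ (k + 1) := by
      rw [Nat.div_div_eq_div_mul, pow_succ']
    rw [hd]
    simp [pvJhDigits]

theorem pvJhDigits_shift (b : Nat) (s : List Char) (k d n : Nat) (hk : 1 ≤ b) :
    pvJhDigits b s k (d * b ^ k + n) = pvJhDigits b s k n := by
  induction k generalizing n d with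
  | zero => rfl
  | succ k ih =>
    have hb : 0 < b := hk
    have he : d * b ^ (k + 1) + n = d * b ^ k * b + n := by ring
    have hmod : (d * b ^ (k + 1) + n) % b = n % b := by
      rw [he, Nat.mul_add_mod']
    have hdiv : (d * b ^ (k + 1) + n) / b = d * b ^ k + n / b := by
      have he2 : d * b ^ (k + 1) + n = b * (d * b ^ k) + n := by ring
      rw [he2, Nat.mul_add_div hb]
    simp only [pvJhDigits, hmod, hdiv, ih]

theorem pvRange_mul_flatMap {α : Type} (f : Nat → α) (a B : Nat) :
    (List.range (a * B)).map f
      = (List.range a).flatMap (fun d => (List.range B).map (fun n => f (d * B + n))) := by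
  induction a with
  | zero => simp
  | succ a ih =>
    have : (a + 1) * B = a * B + B := by ring
    rw [this, List.range_add, List.range_succ]
    simp [ih, List.flatMap_append, Function.comp_def]

theorem pvFlatMap_eq_range {α : Type} (l : List Char) (g : Char → List α) :
    l.flatMap g = (List.range l.length).flatMap (fun d => g (l.getD d ' ')) := by
  induction l with
  | nil => rfl
  | cons c t ih =>
    rw [List.flatMap_cons, ih, List.length_cons, List.range_succ_eq_map]
    simp [List.flatMap_cons, List.flatMap_map]

-- first-'J' decomposition
theorem pvExists_split (cs : List Char) (h : 'J' ∈ cs) :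
    ∃ pre suf, cs = pre ++ 'J' :: suf ∧ 'J' ∉ pre := by
  induction cs with
  | nil => cases h
  | cons c t ih =>
    by_cases hc : c = 'J'
    · exact ⟨[], t, by simp [hc], by simp⟩
    · have h' : 'J' ∈ t := by
        rcases List.mem_cons.mp h with h | h
        · exact absurd h.symm hc
        · exact h
      rcases ih h' with ⟨pre, suf, h1, h2⟩
      exact ⟨c :: pre, suf, by simp [h1], by
        simp only [List.mem_cons, not_or]
        exact ⟨fun e => hc e.symm, h2⟩⟩

theorem pvJokerA_succ (fuel : Nat) (cs : List Char) :
    pvJokerA (fuel + 1) cs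
      = if (!cs.contains 'J' || (PySem.Set.diff (PySem.Set.ofList cs) ['J']).isEmpty) = true
        then [cs]
        else pvStrengthsTail.flatMap (fun card => pvJokerA fuel (pvReplaceFirstJ cs card)) := rfl

theorem pvOtherEmpty (cs : List Char) :
    (PySem.Set.diff (PySem.Set.ofList cs) ['J']).isEmpty = true ↔ ∀ c ∈ cs, c = 'J' := by
  rw [List.isEmpty_iff, List.eq_nil_iff_forall_not_mem]
  constructor
  · intro h c hc
    by_contra hne
    exact h c ((PySem.Set.mem_diff _ _ _).mpr ⟨(PySem.Set.mem_ofList _ _).mpr hc, by simp [hne]⟩)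
  · intro h c hc
    rcases (PySem.Set.mem_diff _ _ _).mp hc with ⟨h1, h2⟩
    exact h2 (by simp [h c ((PySem.Set.mem_ofList _ _).mp h1)])

theorem pvJhSub_nil_right (cs : List Char) (h : 'J' ∉ cs) : pvJhSub cs [] = cs := by
  have := pvJhSub_prefix cs [] [] h
  simpa [pvJhSub] using this

theorem pvJhSub_J_cons (suf ds : List Char) (h : Char) :
    pvJhSub ('J' :: suf) (h :: ds) = h :: pvJhSub suf ds := by
  simp [pvJhSub]

theorem pvJhSub_cons_ne (c : Char) (t ds : List Char) (h : c ≠ 'J') :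
    pvJhSub (c :: t) ds = c :: pvJhSub t ds := by
  simp [pvJhSub, h]

-- MAIN LEMMA
theorem pvMain (k : Nat) : ∀ cs : List Char, cs.count 'J' = k → (∃ c ∈ cs, c ≠ 'J') →
    pvJokerA (k + 1) cs
      = (List.range (12 ^ k)).map
          (fun n => pvJhSub cs ((pvJhDigits 12 pvStrengthsTail k n).reverse)) := by
  induction k with
  | zero =>
    intro cs h0 _
    have hnoJ : 'J' ∉ cs := by
      intro hmem
      have := List.count_pos_iff.mpr hmem
      omega
    have hcont : cs.contains 'J' = false := by
      simpa using hnoJ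
    rw [pvJokerA_succ, if_pos (by simp only [Bool.or_eq_true, Bool.not_eq_eq_eq_not, Bool.not_true]; exact Or.inl hcont)]
    simp [pvJhDigits, pvJhSub_nil_right cs hnoJ, List.range_one]
  | succ k ih =>
    intro cs hcount hex
    have hJ : 'J' ∈ cs := List.count_pos_iff.mp (by omega)
    obtain ⟨pre, suf, hcs, hpre⟩ := pvExists_split cs hJ
    have hprecnt : pre.count 'J' = 0 := List.count_eq_zero.mpr hpre
    have hsuf : suf.count 'J' = k := by
      subst hcs
      simp [List.count_append, hprecnt] at hcount
      omega
    have hcont : cs.contains 'J' = true := by simpa using hJ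
    have hne : (PySem.Set.diff (PySem.Set.ofList cs) ['J']).isEmpty = false := by
      rcases hex with ⟨c, hc1, hc2⟩
      rcases Bool.eq_false_or_eq_true ((PySem.Set.diff (PySem.Set.ofList cs) ['J']).isEmpty)
        with h | h
      · exact absurd ((pvOtherEmpty cs).mp h c hc1) hc2
      · exact h
    have hA : pvJokerA (k + 1 + 1) cs
        = pvStrengthsTail.flatMap (fun card => pvJokerA (k + 1) (pvReplaceFirstJ cs card)) := by
      rw [pvJokerA_succ, if_neg (by
        simp only [Bool.or_eq_true, Bool.not_eq_eq_eq_not, Bool.not_true, not_or]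
        exact ⟨by rw [hcont]; simp, by rw [hne]; simp⟩)]
    rw [hA]
    have hstep : ∀ card ∈ pvStrengthsTail,
        pvJokerA (k + 1) (pvReplaceFirstJ cs card)
          = (List.range (12 ^ k)).map
              (fun n => pre ++ card :: pvJhSub suf ((pvJhDigits 12 pvStrengthsTail k n).reverse)) := by
      intro card hcard
      have hcJ : card ≠ 'J' := pvSubs_ne_J card hcard
      have hrep : pvReplaceFirstJ cs card = pre ++ card :: suf := by
        rw [hcs]; exact pvReplaceFirstJ_eq pre suf card hpre
      have hcnt2 : (pre ++ card :: suf).count 'J' = k := by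
        simp [List.count_append, hprecnt, hsuf, hcJ]
      have hex2 : ∃ c ∈ pre ++ card :: suf, c ≠ 'J' := ⟨card, by simp, hcJ⟩
      rw [hrep, ih _ hcnt2 hex2]
      apply List.map_congr_left
      intro n _
      rw [pvJhSub_prefix pre _ _ hpre, pvJhSub_cons_ne card suf _ hcJ]
    rw [List.flatMap_congr hstep]
    have h12 : pvStrengthsTail.length = 12 := by rfl
    have hpow : (12 : Nat) ^ (k + 1) = 12 * 12 ^ k := by ring
    rw [hpow, pvRange_mul_flatMap, pvFlatMap_eq_range pvStrengthsTail, h12]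
    apply List.flatMap_congr
    intro d hd
    have hd12 : d < 12 := List.mem_range.mp hd
    apply List.map_congr_left
    intro n hn
    have hnlt : n < 12 ^ k := List.mem_range.mp hn
    rw [hcs, pvJhSub_prefix pre _ _ hpre]
    rw [pvJhDigits_reverse_succ]
    have hdig : (d * 12 ^ k + n) / 12 ^ k % 12 = d := by
      have : (d * 12 ^ k + n) / 12 ^ k = d := by
        rw [Nat.add_comm, Nat.add_mul_div_right _ _ (Nat.pow_pos (by norm_num : (0:Nat) < 12)),
          Nat.div_eq_of_lt hnlt]
        omega
      rw [this, Nat.mod_eq_of_lt hd12]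
    rw [hdig, pvJhDigits_shift 12 pvStrengthsTail k d n (by norm_num), pvJhSub_J_cons]

theorem joker_hands_spec : Claim_equal_joker_hands := by
  intro raw _
  unfold Spec_joker_hands joker_hands joker_hands_alt
  by_cases hall : raw.toList.all (fun c => c == 'J') = true
  · rw [if_pos hall]
    have hallJ : ∀ c ∈ raw.toList, c = 'J' := by
      intro c hc
      simpa using List.all_eq_true.mp hall c hc
    have hcond : (!raw.toList.contains 'J'
        || (PySem.Set.diff (PySem.Set.ofList raw.toList) ['J']).isEmpty) = true := by
      simp only [Bool.or_eq_true]
      exact Or.inr ((pvOtherEmpty raw.toList).mpr hallJ)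
    rw [pvJokerA_succ, if_pos hcond]
    simp [String.ofList_toList]
  · rw [if_neg hall]
    have hex : ∃ c ∈ raw.toList, c ≠ 'J' := by
      by_contra hno
      push Not at hno
      exact hall (List.all_eq_true.mpr (fun c hc => by simpa using hno c hc))
    rw [pvMain (raw.toList.count 'J') raw.toList rfl hex, List.map_map]
    rfl
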